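-- pv_equiv track=rewrite | github.com/usama8800/ConsoleWorlde | main.py | rateWord
-- ===== SOURCE A (Python) =====
-- def rateWord(x: str, chosen: str):
--     ret = [-1] * 5
--     chosen_indices_done = []
--     for i, letter in enumerate(x):
--         if chosen[i] == letter:
--             ret[i] = 1
--             chosen_indices_done.append(i)
--     for i, letter in enumerate(x):
--         if ret[i] == 1:
--             continue
--         for j, letter1 in enumerate(chosen):
--             if j in chosen_indices_done:
--                 continue
--             if letter1 == letter:
--                 ret[i] = 0
--                 chosen_indices_done.append(j)
--                 break
--     return ret
-- ===== SOURCE B (Python) =====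
-- def rateWord(x: str, chosen: str):
--     ret = [-1] * 5
--     avail = {}
--     for j, c in enumerate(chosen):
--         if not (j < len(x) and x[j] == c):
--             avail[c] = avail.get(c, 0) + 1
--     for i, letter in enumerate(x):
--         if chosen[i] == letter:
--             ret[i] = 1
--     for i, letter in enumerate(x):
--         if ret[i] != 1 and avail.get(letter, 0) > 0:
--             ret[i] = 0
--             avail[letter] -= 1
--     return ret
-- ===== Notes on version B (the rewrite author's own statement) =====
-- stated objective: idiomatic
-- what changed: Replaces A's greedy inner rescan of `chosen` (with an explicit list of consumed indices, `j in list` tests inside a nested loop) by a letter-frequency dictionary of the non-green chosen letters built once and decremented as yellow positions are assigned left to right.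
import Mathlib
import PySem

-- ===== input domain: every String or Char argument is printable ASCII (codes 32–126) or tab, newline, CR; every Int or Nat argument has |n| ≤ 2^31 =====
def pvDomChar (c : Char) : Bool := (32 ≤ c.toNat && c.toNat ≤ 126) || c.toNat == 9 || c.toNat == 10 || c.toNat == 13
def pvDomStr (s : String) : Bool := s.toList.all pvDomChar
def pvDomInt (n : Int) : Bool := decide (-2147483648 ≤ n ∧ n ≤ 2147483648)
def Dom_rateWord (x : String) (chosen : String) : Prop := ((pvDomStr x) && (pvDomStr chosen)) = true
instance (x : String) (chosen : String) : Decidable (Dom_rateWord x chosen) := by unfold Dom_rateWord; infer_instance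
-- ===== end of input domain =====

-- B replaces A's inner scan over `chosen` (quadratic greedy matching with an explicit
-- list of consumed indices) by a letter-frequency dictionary consumed left to right.

-- ===== PORT A =====
-- inner 'for j, letter1 in enumerate(chosen): … break' of A's second loop
def pvInnerA (i : Int) (letter : Char) : List (Int × Char) → List Int → List Int → List Int × List Int
  | [], ret, done => (ret, done)
  | (j, c) :: rest, ret, done =>
    if j ∈ done then pvInnerA i letter rest ret done
    else if c = letter then (PySem.List.pySetD ret i 0, done ++ [j])
    else pvInnerA i letter rest ret done

def rateWord (x : String) (chosen : String) : List Int :=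
  let xs := x.toList
  let cs := chosen.toList
  let st1 : List Int × List Int :=
    (PySem.List.enumerate xs 0).foldl (fun st p =>
      if PySem.List.pyGetD cs p.1 ' ' = p.2 then
        (PySem.List.pySetD st.1 p.1 1, st.2 ++ [p.1])
      else st)
      ([-1, -1, -1, -1, -1], [])
  let st2 :=
    (PySem.List.enumerate xs 0).foldl (fun st p =>
      if PySem.List.pyGetD st.1 p.1 0 = 1 then st
      else pvInnerA p.1 p.2 (PySem.List.enumerate cs 0) st.1 st.2) st1
  st2.1

-- ===== PORT B =====
def rateWord_alt (x : String) (chosen : String) : List Int :=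
  let xs := x.toList
  let cs := chosen.toList
  let avail : PySem.Dict Char Int :=
    (PySem.List.enumerate cs 0).foldl (fun d p =>
      if ¬ (p.1 < (xs.length : Int) ∧ PySem.List.pyGetD xs p.1 ' ' = p.2) then
        d.insert p.2 (d.getD p.2 0 + 1)
      else d) PySem.Dict.empty
  let ret1 : List Int :=
    (PySem.List.enumerate xs 0).foldl (fun ret p =>
      if PySem.List.pyGetD cs p.1 ' ' = p.2 then PySem.List.pySetD ret p.1 1 else ret)
      [-1, -1, -1, -1, -1]
  let st2 :=
    (PySem.List.enumerate xs 0).foldl (fun st p =>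
      if PySem.List.pyGetD st.1 p.1 0 ≠ 1 ∧ 0 < st.2.getD p.2 0 then
        (PySem.List.pySetD st.1 p.1 0, st.2.insert p.2 (st.2.getD p.2 0 - 1))
      else st) (ret1, avail)
  st2.1

-- ===== PRECONDITION & SPEC =====
-- Pre_ excludes exactly the inputs where A raises IndexError:
-- len(x) > 5 (ret has 5 slots) or len(chosen) < len(x) (chosen[i] out of range).
def Pre_rateWord (x : String) (chosen : String) : Prop :=
  x.toList.length ≤ 5 ∧ x.toList.length ≤ chosen.toList.length
instance (x : String) (chosen : String) : Decidable (Pre_rateWord x chosen) := by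
  unfold Pre_rateWord; infer_instance

def pvWitness_rateWord : String × String := ("abc", "cabde")

def Spec_rateWord (x : String) (chosen : String) (out : List Int) : Prop := out = rateWord_alt x chosen
instance (x : String) (chosen : String) (out : List Int) : Decidable (Spec_rateWord x chosen out) := by unfold Spec_rateWord; infer_instance

-- ===== CLAIM (what is proved, stated in full; the proofs are below) =====
def Claim_equal_rateWord : Prop := ∀ (x : String) (chosen : String), Dom_rateWord x chosen → Pre_rateWord x chosen → Spec_rateWord x chosen (rateWord x chosen)

-- ===== LEMMAS AND PROOFS =====

-- count of still-available positions of `chosen` (index not in `done`) carrying letter c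
def pvCnt (enumC : List (Int × Char)) (done : List Int) (c : Char) : Nat :=
  enumC.countP (fun p => !(decide (p.1 ∈ done)) && (p.2 == c))

lemma pvAvailGen (l : List (Int × Char)) (q : Int × Char → Prop) [DecidablePred q]
    (d : PySem.Dict Char Int) (c : Char) :
    (l.foldl (fun d p => if ¬ q p then d.insert p.2 (d.getD p.2 0 + 1) else d) d).getD c 0
    = d.getD c 0 + (l.countP (fun p => !(decide (q p)) && (p.2 == c)) : Int) := by
  induction l generalizing d with
  | nil => simp
  | cons p rest ih =>
    by_cases h : q p
    · rw [List.foldl_cons, if_neg (not_not_intro h), ih, List.countP_cons]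
      simp [h]
    · rw [List.foldl_cons, if_pos h, ih, PySem.Dict.getD_insert, List.countP_cons]
      by_cases hc : c = p.2
      · subst hc
        simp [h]
        ring
      · have : (p.2 == c) = false := by simp [Ne.symm hc]
        simp [h, hc, this]

lemma pvCnt_cons (p : Int × Char) (rest : List (Int × Char)) (dn : List Int) (c : Char) :
    pvCnt (p :: rest) dn c = (if p.1 ∉ dn ∧ p.2 = c then 1 else 0) + pvCnt rest dn c := by
  by_cases h1 : p.1 ∈ dn <;> by_cases h2 : p.2 = c <;>
    simp [pvCnt, h1, h2] <;> omega

lemma pvCnt_append (ps : List (Int × Char)) (hnd : (ps.map (·.1)).Nodup)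
    (done : List Int) (j : Int) (letter : Char) (hj : (j, letter) ∈ ps) (hjd : j ∉ done)
    (c : Char) :
    pvCnt ps (done ++ [j]) c = pvCnt ps done c - (if c = letter then 1 else 0) := by
  induction ps with
  | nil => simp at hj
  | cons p rest ih =>
    rw [List.map_cons, List.nodup_cons] at hnd
    rcases List.mem_cons.mp hj with heq | hmem
    · have hp : p = (j, letter) := heq.symm
      subst hp
      have hrest : ∀ q ∈ rest, q.1 ≠ j := by
        intro q hq hqj
        exact hnd.1 (by simpa [hqj] using List.mem_map_of_mem (f := (·.1)) hq)
      have hsame : pvCnt rest (done ++ [j]) c = pvCnt rest done c := by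
        unfold pvCnt
        apply List.countP_congr
        intro q hq
        simp [List.mem_append, hrest q hq]
      rw [pvCnt_cons, pvCnt_cons, hsame]
      by_cases hc : letter = c <;> simp [hc, hjd, eq_comm]
    · have hpj : p.1 ≠ j := by
        intro hpj
        exact hnd.1 (by simpa [hpj] using List.mem_map_of_mem (f := (·.1)) hmem)
      have hle : (if c = letter then 1 else 0) ≤ pvCnt rest done c := by
        by_cases hc : c = letter
        · have : 0 < pvCnt rest done letter :=
            List.countP_pos_iff.mpr ⟨(j, letter), hmem, by simp [hjd]⟩
          simpa [hc] using this
        · simp [hc]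
      have hcond : (p.1 ∉ done ++ [j] ∧ p.2 = c) ↔ (p.1 ∉ done ∧ p.2 = c) := by simp [hpj]
      rw [pvCnt_cons, pvCnt_cons, ih hnd.2 hmem, if_congr hcond rfl rfl]
      by_cases hC : p.1 ∉ done ∧ p.2 = c <;> simp [hC] <;> omega

lemma pvInnerA_spec (i : Int) (letter : Char) (ps : List (Int × Char))
    (ret : List Int) (done : List Int) :
    (pvCnt ps done letter = 0 → pvInnerA i letter ps ret done = (ret, done)) ∧
    (pvCnt ps done letter ≠ 0 → ∃ j, (j, letter) ∈ ps ∧ j ∉ done ∧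
      pvInnerA i letter ps ret done = (PySem.List.pySetD ret i 0, done ++ [j])) := by
  induction ps with
  | nil => simp [pvCnt, pvInnerA]
  | cons p rest ih =>
    obtain ⟨j, c⟩ := p
    by_cases hjd : j ∈ done
    · have h1 : pvCnt ((j, c) :: rest) done letter = pvCnt rest done letter := by
        simp [pvCnt, hjd]
      have h2 : pvInnerA i letter ((j, c) :: rest) ret done = pvInnerA i letter rest ret done := by
        simp [pvInnerA, hjd]
      rw [h1, h2]
      refine ⟨ih.1, fun h => ?_⟩
      obtain ⟨j', hmem, hnd, heq⟩ := ih.2 h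
      exact ⟨j', List.mem_cons_of_mem _ hmem, hnd, heq⟩
    · by_cases hc : c = letter
      · subst hc
        constructor
        · intro h
          exfalso
          simp [pvCnt, hjd] at h
        · intro _
          refine ⟨j, List.mem_cons_self, hjd, ?_⟩
          simp [pvInnerA, hjd]
      · have h1 : pvCnt ((j, c) :: rest) done letter = pvCnt rest done letter := by
          simp [pvCnt, hc]
        have h2 : pvInnerA i letter ((j, c) :: rest) ret done = pvInnerA i letter rest ret done := by
          simp [pvInnerA, hjd, hc]
        rw [h1, h2]
        refine ⟨ih.1, fun h => ?_⟩
        obtain ⟨j', hmem, hnd, heq⟩ := ih.2 h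
        exact ⟨j', List.mem_cons_of_mem _ hmem, hnd, heq⟩

lemma pvYellow (enumC : List (Int × Char)) (hnd : (enumC.map (·.1)).Nodup) :
    ∀ (ps : List (Int × Char)) (ret : List Int) (done : List Int) (avail : PySem.Dict Char Int),
    (∀ c, avail.getD c 0 = (pvCnt enumC done c : Int)) →
    (ps.foldl (fun st p => if PySem.List.pyGetD st.1 p.1 0 = 1 then st
        else pvInnerA p.1 p.2 enumC st.1 st.2) (ret, done)).1
    = (ps.foldl (fun st p => if PySem.List.pyGetD st.1 p.1 0 ≠ 1 ∧ 0 < st.2.getD p.2 0 then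
          (PySem.List.pySetD st.1 p.1 0, st.2.insert p.2 (st.2.getD p.2 0 - 1)) else st)
        (ret, avail)).1 := by
  intro ps
  induction ps with
  | nil => intro ret done avail _; rfl
  | cons p rest ih =>
    intro ret done avail hinv
    obtain ⟨i, letter⟩ := p
    rw [List.foldl_cons, List.foldl_cons]
    by_cases hret : PySem.List.pyGetD ret i 0 = 1
    · rw [if_pos hret, if_neg (by simp [hret])]
      exact ih ret done avail hinv
    · rw [if_neg hret]
      by_cases hcnt : pvCnt enumC done letter = 0
      · have hA : pvInnerA i letter enumC ret done = (ret, done) :=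
          (pvInnerA_spec i letter enumC ret done).1 hcnt
        have hB : ¬ (PySem.List.pyGetD ret i 0 ≠ 1 ∧ 0 < avail.getD letter 0) := by
          simp [hinv letter, hcnt]
        rw [hA, if_neg hB]
        exact ih ret done avail hinv
      · obtain ⟨j, hmem, hjnd, heq⟩ := (pvInnerA_spec i letter enumC ret done).2 hcnt
        have hpos : 0 < avail.getD letter 0 := by
          rw [hinv letter]
          exact_mod_cast Nat.pos_of_ne_zero hcnt
        rw [heq, if_pos ⟨hret, hpos⟩]
        apply ih
        intro c
        rw [PySem.Dict.getD_insert]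
        rw [pvCnt_append enumC hnd done j letter hmem hjnd c]
        by_cases hc : c = letter
        · subst hc
          rw [if_pos rfl, if_pos rfl, hinv c]
          have := Nat.pos_of_ne_zero hcnt
          push_cast [Nat.cast_sub this]
          ring
        · rw [if_neg hc, if_neg hc, hinv c]
          simp

lemma pvNodupFst (cs : List Char) : ((PySem.List.enumerate cs 0).map (·.1)).Nodup :=
  by
  have h := PySem.List.pairwise_lt_enumerate cs 0
  exact List.Pairwise.map (fun p : Int × Char => p.1) (fun a b hab => ne_of_lt hab) h

lemma pvMemG (xs cs : List Char) (k : Nat) (hk : k < cs.length) :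
    ((k:Int) ∈ ((PySem.List.enumerate xs 0).filter
        (fun q => decide (PySem.List.pyGetD cs q.1 ' ' = q.2))).map (·.1))
    ↔ (k < xs.length ∧ xs.getD k ' ' = cs.getD k ' ') := by
  constructor
  · intro h
    obtain ⟨q, hq, hq1⟩ := List.mem_map.mp h
    obtain ⟨hqe, hqf⟩ := List.mem_filter.mp hq
    obtain ⟨m, hm, rfl⟩ := (PySem.List.mem_enumerate_iff _ _ _).mp hqe
    simp only [zero_add] at hq1 ⊢
    have hmk : m = k := by exact_mod_cast hq1
    subst hmk
    refine ⟨hm, ?_⟩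
    have := of_decide_eq_true hqf
    simp only [zero_add, PySem.List.pyGetD_natCast] at this
    rw [List.getD_eq_getElem _ _ hm, List.getD_eq_getElem _ _ hk]
    rw [List.getD_eq_getElem _ _ hk] at this
    exact this.symm
  · rintro ⟨hkx, hgd⟩
    apply List.mem_map.mpr
    refine ⟨((k:Int), xs[k]), List.mem_filter.mpr ⟨?_, ?_⟩, rfl⟩
    · exact (PySem.List.mem_enumerate_iff _ _ _).mpr ⟨k, hkx, by simp⟩
    · apply decide_eq_true
      simp only [PySem.List.pyGetD_natCast]
      rw [List.getD_eq_getElem _ _ hk]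
      rw [List.getD_eq_getElem _ _ hkx, List.getD_eq_getElem _ _ hk] at hgd
      exact hgd.symm

lemma pvGreen (enumX : List (Int × Char)) (cs : List Char) (ret : List Int) (done : List Int) :
    enumX.foldl (fun st p => if PySem.List.pyGetD cs p.1 ' ' = p.2 then
        (PySem.List.pySetD st.1 p.1 1, st.2 ++ [p.1]) else st) (ret, done)
    = (enumX.foldl (fun r p => if PySem.List.pyGetD cs p.1 ' ' = p.2 then
          PySem.List.pySetD r p.1 1 else r) ret,
       done ++ (enumX.filter (fun p => decide (PySem.List.pyGetD cs p.1 ' ' = p.2))).map (·.1)) := by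
  induction enumX generalizing ret done with
  | nil => simp
  | cons p rest ih =>
    by_cases h : PySem.List.pyGetD cs p.1 ' ' = p.2
    · simp [h, ih]
    · simp [h, ih]


-- ===== VERDICT (by name: the statement is the Claim_ definition above) =====
theorem rateWord_spec : Claim_equal_rateWord := by
  unfold Claim_equal_rateWord
  intro x chosen _ _
  unfold Spec_rateWord rateWord rateWord_alt
  dsimp only
  rw [pvGreen, List.nil_append]
  apply pvYellow _ (pvNodupFst _)
  intro c
  refine (pvAvailGen _ _ _ _).trans ?_
  rw [PySem.Dict.getD_empty, zero_add]
  norm_cast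
  unfold pvCnt
  apply List.countP_congr
  intro p hp
  obtain ⟨k, hk, rfl⟩ := (PySem.List.mem_enumerate_iff _ _ _).mp hp
  dsimp only
  simp only [zero_add]
  have h1 : ((k:Int) < (x.toList.length:Int) ∧ PySem.List.pyGetD x.toList (k:Int) ' ' = chosen.toList[k]) ↔ (k < x.toList.length ∧ x.toList.getD k ' ' = chosen.toList.getD k ' ') := by
    constructor
    · rintro ⟨ha, hb⟩
      refine ⟨by exact_mod_cast ha, ?_⟩
      rw [List.getD_eq_getElem _ _ hk]
      simpa using hb
    · rintro ⟨ha, hb⟩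
      refine ⟨by exact_mod_cast ha, ?_⟩
      rw [List.getD_eq_getElem _ _ hk] at hb
      simpa using hb
  have h2 := pvMemG x.toList chosen.toList k hk
  have h3 : ((k:Int) < (x.toList.length:Int) ∧ PySem.List.pyGetD x.toList (k:Int) ' ' = chosen.toList[k]) ↔
      ((k:Int) ∈ ((PySem.List.enumerate x.toList 0).filter
        (fun q => decide (PySem.List.pyGetD chosen.toList q.1 ' ' = q.2))).map (·.1)) := h1.trans h2.symm
  rw [decide_eq_decide.mpr h3]
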